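-- pv_equiv track=rewrite | github.com/ab00b/pyhanlp | tests/book/ch02/fully_segment.py | fully_segment
-- ===== SOURCE A (Python) =====
-- def fully_segment(text, dic):
--     word_list = []
--     for i in range(len(text)):                  # i 从 0 到text的最后一个字的下标遍历
--         for j in range(i + 1, len(text) + 1):   # j 遍历[i + 1, len(text)]区间
--             word = text[i:j]                    # 取出连续区间[i, j]对应的字符串
--             if word in dic:                     # 如果在词典中，则认为是一个词
--                 word_list.append(word)
--     return word_list
-- ===== SOURCE B (Python) =====
-- def fully_segment(text, dic):
--     # Word-major search: scan the text once per dictionary word, bucket each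
--     # occurrence by its start position, then emit buckets in order (lengths ascending).
--     n = len(text)
--     buckets = [[] for _ in range(n)]
--     for w in set(dic):
--         L = len(w)
--         if L:
--             for pos in range(n - L + 1):
--                 if text.startswith(w, pos):
--                     buckets[pos].append(L)
--     return [text[i:i + L] for i in range(n) for L in sorted(buckets[i])]
-- ===== Notes on version B (the rewrite author's own statement) =====
-- stated objective: faster
-- what changed: A enumerates every substring text[i:j] and tests it by a linear scan of the dictionary list; B instead searches the text once per distinct dictionary word, buckets each occurrence by start position, and emits the buckets in position order with lengths ascending, so the inner scan over all substrings and over the dictionary disappears.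
import Mathlib
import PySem

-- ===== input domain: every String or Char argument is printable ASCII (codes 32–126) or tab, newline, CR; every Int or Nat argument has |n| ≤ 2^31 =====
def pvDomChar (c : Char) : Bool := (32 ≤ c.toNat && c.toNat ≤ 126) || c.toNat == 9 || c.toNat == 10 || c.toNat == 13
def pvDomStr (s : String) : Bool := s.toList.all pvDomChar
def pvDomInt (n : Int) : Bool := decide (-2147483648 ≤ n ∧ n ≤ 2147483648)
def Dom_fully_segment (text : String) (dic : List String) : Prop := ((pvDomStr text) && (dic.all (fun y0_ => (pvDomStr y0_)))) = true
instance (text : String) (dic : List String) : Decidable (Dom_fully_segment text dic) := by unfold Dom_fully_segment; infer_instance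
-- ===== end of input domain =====

-- B replaces A's substring enumeration (every text[i:j] tested by a linear scan of the
-- dictionary list) with a word-major search: each dictionary word is searched for in the
-- text once, its occurrences are bucketed by start position, and the buckets are emitted
-- in position order with lengths ascending.

-- ===== PORT A =====
def fully_segment (text : String) (dic : List String) : List String :=
  (PySem.List.pyRange 0 (PySem.Str.len text) 1).foldl (fun word_list i =>
    (PySem.List.pyRange (i + 1) (PySem.Str.len text + 1) 1).foldl (fun word_list j =>
      let word := PySem.Str.slice text (some i) (some j)
      if dic.contains word then word_list ++ [word] else word_list) word_list) []

-- ===== PORT B =====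
def fully_segment_alt (text : String) (dic : List String) : List String :=
  let n := PySem.Str.len text
  let buckets0 : List (List Int) := (PySem.List.pyRange 0 n 1).map (fun _ => [])
  let buckets := (PySem.Set.ofList dic).foldl (fun bs w =>
    let L := PySem.Str.len w
    if L ≠ 0 then
      -- text.startswith(w, pos): exact as w.toList <+: text.toList.drop pos since 0 ≤ pos ≤ len(text)
      (PySem.List.pyRange 0 (n - L + 1) 1).foldl (fun bs pos =>
        if PySem.Chars.startswith (text.toList.drop pos.toNat) w.toList then
          bs.set pos.toNat ((bs.getD pos.toNat []) ++ [L])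
        else bs) bs
    else bs) buckets0
  (PySem.List.pyRange 0 n 1).flatMap (fun i =>
    (PySem.List.sorted (buckets.getD i.toNat []) (fun x => x)).map (fun L =>
      PySem.Str.slice text (some i) (some (i + L))))

-- ===== PRECONDITION & SPEC =====
def Spec_fully_segment (text : String) (dic : List String) (out : List String) : Prop := out = fully_segment_alt text dic
instance (text : String) (dic : List String) (out : List String) : Decidable (Spec_fully_segment text dic out) := by unfold Spec_fully_segment; infer_instance

-- ===== CLAIM (what is proved, stated in full; the proofs are below) =====
def Claim_equal_fully_segment : Prop := ∀ (text : String) (dic : List String), Dom_fully_segment text dic → Spec_fully_segment text dic (fully_segment text dic)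

-- ===== LEMMAS AND PROOFS =====

-- w contributes its length to bucket i: w is nonempty, fits, and occurs at position i.
def pvHit (t : List Char) (i : Nat) (w : String) : Bool :=
  decide (w.toList ≠ [] ∧ i + w.toList.length ≤ t.length ∧ w.toList <+: t.drop i)

-- The ascending list of lengths of dictionary substrings starting at i.
def pvLs (dic : List String) (t : List Char) (i : Nat) : List Int :=
  ((List.range (t.length - i)).filter
      (fun k => dic.contains (String.ofList ((t.drop i).take (1 + k))))).map
    (fun k => ((1 + k : Nat) : Int))

-- a range-indexed fold of conditional bucket appends, observed at one index
theorem foldl_set_getElem? (L : Int) (c : Nat → Bool) (m : Nat) (bs : List (List Int)) (i : Nat) :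
    ((List.range m).foldl
        (fun bs k => if c k then bs.set k ((bs.getD k []) ++ [L]) else bs) bs)[i]?
      = if i < m ∧ c i = true then (bs[i]?).map (fun v => v ++ [L]) else bs[i]? := by
  induction m with
  | zero => simp
  | succ m ih =>
    rw [List.range_succ, List.foldl_append]
    set prev := (List.range m).foldl (fun bs k => if c k then bs.set k ((bs.getD k []) ++ [L]) else bs) bs with hprev
    have hlen : prev.length = bs.length := by
      rw [hprev]; clear hprev ih
      induction (List.range m) generalizing bs with
      | nil => rfl
      | cons x xs ih2 =>
        simp only [List.foldl_cons]
        rw [ih2]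
        split <;> simp
    simp only [List.foldl_cons, List.foldl_nil]
    by_cases hc : c m = true
    · rw [if_pos hc, List.getElem?_set]
      by_cases hmi : m = i
      · subst hmi
        by_cases hlt : m < prev.length
        · rw [if_pos rfl, if_pos hlt]
          have hmm : ¬ (m < m ∧ c m = true) := by omega
          have hpm : prev[m]? = bs[m]? := by rw [ih, if_neg hmm]
          rw [if_pos ⟨Nat.lt_succ_self m, hc⟩, List.getD_eq_getElem?_getD, hpm]
          have hbs : m < bs.length := hlen ▸ hlt
          simp [List.getElem?_eq_getElem hbs]
        · rw [if_pos rfl, if_neg hlt]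
          rw [if_pos ⟨Nat.lt_succ_self m, hc⟩]
          have hbs : bs.length ≤ m := by omega
          simp [List.getElem?_eq_none_iff.mpr hbs]
      · rw [if_neg hmi, ih]
        by_cases hic : i < m ∧ c i = true
        · rw [if_pos hic, if_pos ⟨by omega, hic.2⟩]
        · rw [if_neg hic]
          have : ¬ (i < m + 1 ∧ c i = true) := by
            rintro ⟨h1, h2⟩; exact hic ⟨by omega, h2⟩
          rw [if_neg this]
    · rw [if_neg hc, ih]
      by_cases hic : i < m ∧ c i = true
      · rw [if_pos hic, if_pos ⟨by omega, hic.2⟩]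
      · rw [if_neg hic]
        have : ¬ (i < m + 1 ∧ c i = true) := by
          rintro ⟨h1, h2⟩
          rcases Nat.lt_succ_iff_lt_or_eq.mp h1 with h | h
          · exact hic ⟨h, h2⟩
          · subst h; exact hc h2
        rw [if_neg this]

-- the whole word loop, observed at one index
theorem outer_getElem? (text : String) (ws : List String) (bs : List (List Int)) (i : Nat) :
    ((ws.foldl (fun bs w =>
        if ((w.toList.length : Int)) ≠ 0 then
          (PySem.List.pyRange 0 ((text.toList.length : Int) - (w.toList.length : Int) + 1) 1).foldl (fun bs pos =>
            if PySem.Chars.startswith (text.toList.drop pos.toNat) w.toList then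
              bs.set pos.toNat ((bs.getD pos.toNat []) ++ [(w.toList.length : Int)])
            else bs) bs
        else bs) bs)[i]?)
      = (bs[i]?).map (fun v => v ++ (ws.filter (pvHit text.toList i)).map (fun w => (w.toList.length : Int))) := by
  induction ws generalizing bs with
  | nil => simp
  | cons w rest ih =>
    rw [List.foldl_cons, ih, List.filter_cons]
    by_cases hw : (w.toList.length : Int) ≠ 0
    · rw [if_pos hw]
      have hstep : ((PySem.List.pyRange 0 ((text.toList.length : Int) - (w.toList.length : Int) + 1) 1).foldl (fun bs pos =>
            if PySem.Chars.startswith (text.toList.drop pos.toNat) w.toList then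
              bs.set pos.toNat ((bs.getD pos.toNat []) ++ [(w.toList.length : Int)])
            else bs) bs)[i]?
          = if i < ((text.toList.length : Int) - (w.toList.length : Int) + 1).toNat
                ∧ PySem.Chars.startswith (text.toList.drop i) w.toList = true
            then (bs[i]?).map (fun v => v ++ [(w.toList.length : Int)]) else bs[i]? := by
        rw [PySem.List.pyRange_one]
        rw [List.foldl_map]
        have : (fun (bs : List (List Int)) (k : Nat) =>
            if PySem.Chars.startswith (text.toList.drop ((0 : Int) + (k : Int)).toNat) w.toList then
              bs.set ((0 : Int) + (k : Int)).toNat ((bs.getD ((0 : Int) + (k : Int)).toNat []) ++ [(w.toList.length : Int)])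
            else bs)
            = (fun bs k =>
            if (fun k => PySem.Chars.startswith (text.toList.drop k) w.toList) k then
              bs.set k ((bs.getD k []) ++ [(w.toList.length : Int)]) else bs) := by
          funext bs k; simp
        rw [this, foldl_set_getElem?]
        norm_num
      rw [hstep]
      by_cases hhit : pvHit text.toList i w = true
      · have hcond : i < ((text.toList.length : Int) - (w.toList.length : Int) + 1).toNat
            ∧ PySem.Chars.startswith (text.toList.drop i) w.toList = true := by
          have h := of_decide_eq_true hhit
          refine ⟨by omega, (PySem.Chars.startswith_iff _ _).mpr h.2.2⟩
        rw [if_pos hcond, hhit, Option.map_map]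
        congr 1; funext v; simp
      · have hcond : ¬ (i < ((text.toList.length : Int) - (w.toList.length : Int) + 1).toNat
            ∧ PySem.Chars.startswith (text.toList.drop i) w.toList = true) := by
          rintro ⟨h1, h2⟩
          apply hhit
          refine decide_eq_true ⟨?_, by omega, (PySem.Chars.startswith_iff _ _).mp h2⟩
          intro hnil
          rw [hnil] at hw; simp at hw
        rw [if_neg hcond]
        simp only [Bool.not_eq_true] at hhit
        rw [hhit]; simp
    · rw [if_neg hw]
      have : pvHit text.toList i w = false := by
        simp only [not_not] at hw
        have : w.toList = [] := List.length_eq_zero_iff.mp (by exact_mod_cast hw)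
        simp [pvHit, this]
      rw [this]; simp

theorem bucket_perm (dic : List String) (t : List Char) (i : Nat) :
    (pvLs dic t i).Perm (((PySem.Set.ofList dic).filter (pvHit t i)).map (fun w => (w.toList.length : Int))) := by
  have hnd1 : (pvLs dic t i).Nodup := by
    refine List.Nodup.map_on ?_ ((List.nodup_range).filter _)
    intro x _ y _ h
    have : 1 + x = 1 + y := by exact_mod_cast h
    omega
  have hnd2 : ((((PySem.Set.ofList dic).filter (pvHit t i))).map (fun w => (w.toList.length : Int))).Nodup := by
    refine List.Nodup.map_on ?_ ((PySem.Set.nodup_ofList dic).filter _)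
    intro x hx y hy h
    have hxf := (List.mem_filter.mp hx).2
    have hyf := (List.mem_filter.mp hy).2
    simp only [pvHit] at hxf hyf
    have hx' := of_decide_eq_true hxf
    have hy' := of_decide_eq_true hyf
    have hxt : x.toList = (t.drop i).take x.toList.length := List.prefix_iff_eq_take.mp hx'.2.2
    have hyt : y.toList = (t.drop i).take y.toList.length := List.prefix_iff_eq_take.mp hy'.2.2
    have hlen : x.toList.length = y.toList.length := by exact_mod_cast h
    have : x.toList = y.toList := by rw [hxt, hyt, hlen]
    calc x = String.ofList x.toList := String.ofList_toList.symm
      _ = String.ofList y.toList := by rw [this]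
      _ = y := String.ofList_toList
  rw [List.perm_ext_iff_of_nodup hnd1 hnd2]
  intro L
  simp only [pvLs, List.mem_map, List.mem_filter, List.mem_range, PySem.Set.mem_ofList]
  constructor
  · rintro ⟨k, ⟨hk, hc⟩, rfl⟩
    have hlen : ((t.drop i).take (1 + k)).length = 1 + k := by
      rw [List.length_take, List.length_drop]; omega
    refine ⟨String.ofList ((t.drop i).take (1 + k)), ⟨?_, ?_⟩, ?_⟩
    · exact List.contains_iff_mem.mp hc
    · refine decide_eq_true ⟨?_, ?_, ?_⟩
      · rw [String.toList_ofList]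
        intro hnil
        rw [hnil] at hlen; simp only [List.length_nil] at hlen; omega
      · rw [String.toList_ofList, hlen]; omega
      · rw [String.toList_ofList]; exact List.take_prefix _ _
    · rw [String.toList_ofList, hlen]
  · rintro ⟨w, ⟨hmem, hhit⟩, rfl⟩
    simp only [pvHit] at hhit
    have h := of_decide_eq_true hhit
    have hm1 : 1 ≤ w.toList.length := List.length_pos_of_ne_nil h.1
    refine ⟨w.toList.length - 1, ⟨by omega, ?_⟩, by push_cast; omega⟩
    have h1k : 1 + (w.toList.length - 1) = w.toList.length := by omega
    rw [h1k]
    have : (t.drop i).take w.toList.length = w.toList := (List.prefix_iff_eq_take.mp h.2.2).symm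
    rw [this, String.ofList_toList]
    exact List.contains_iff_mem.mpr hmem

theorem bucket_sorted (dic : List String) (t : List Char) (i : Nat) :
    PySem.List.sorted (((PySem.Set.ofList dic).filter (pvHit t i)).map (fun w => (w.toList.length : Int)))
        (fun x => x)
      = pvLs dic t i := by
  refine PySem.List.sorted_eq_of_perm_of_pairwise_lt _ _ _ (bucket_perm dic t i) ?_
  refine List.Pairwise.map _ ?_ ((List.pairwise_lt_range).filter _)
  intro a b h
  exact_mod_cast by omega

-- per start index, B's sorted-bucket emission equals A's inner filter-scan
theorem inner_eq (text : String) (dic : List String) (a : Nat) :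
    (pvLs dic text.toList a).map (fun L => PySem.Str.slice text (some (a : Int)) (some ((a : Int) + L)))
      = ((PySem.List.pyRange ((a : Int) + 1) ((text.toList.length : Int) + 1) 1).filter
            (fun j => dic.contains (PySem.Str.slice text (some (a : Int)) (some j)))).map
          (fun j => PySem.Str.slice text (some (a : Int)) (some j)) := by
  have hslice : ∀ k : Nat,
      PySem.Str.slice text (some (a : Int)) (some ((a : Int) + 1 + (k : Int)))
        = String.ofList ((text.toList.drop a).take (1 + k)) := by
    intro k
    have hcast : (a : Int) + 1 + (k : Int) = (a : Int) + ((1 + k : Nat) : Int) := by push_cast; ring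
    rw [hcast]
    show String.ofList (PySem.List.slice text.toList (some (a : Int)) (some ((a : Int) + ((1 + k : Nat) : Int)))) = _
    rw [PySem.List.slice_natCast_add]
  unfold pvLs
  rw [List.map_map, PySem.List.pyRange_one, List.filter_map, List.map_map]
  have h1 : (((text.toList.length : Int) + 1) - ((a : Int) + 1)).toNat = text.toList.length - a := by omega
  rw [h1]
  have hcast2 : ∀ k : Nat, (a : Int) + ((1 + k : Nat) : Int) = (a : Int) + 1 + (k : Int) := by
    intro k; push_cast; ring
  congr 1
  · funext k
    simp only [Function.comp]
    rw [hcast2, hslice]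
  · congr 1
    funext k
    simp only [Function.comp]
    rw [hslice]

-- ===== VERDICT (by name: the statement is the Claim_ definition above) =====
theorem fully_segment_spec : Claim_equal_fully_segment := by
  intro text dic _
  unfold Spec_fully_segment
  have hA : fully_segment text dic
      = (PySem.List.pyRange 0 ((text.toList.length : Int)) 1).flatMap (fun i =>
          ((PySem.List.pyRange (i + 1) ((text.toList.length : Int) + 1) 1).filter
              (fun j => dic.contains (PySem.Str.slice text (some i) (some j)))).map
            (fun j => PySem.Str.slice text (some i) (some j))) := by
    unfold fully_segment
    simp only [PySem.Str.len_eq]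
    rw [PySem.List.foldl_congr_mem _ _
      (fun acc i => acc ++ ((PySem.List.pyRange (i + 1) ((text.toList.length : Int) + 1) 1).filter
              (fun j => dic.contains (PySem.Str.slice text (some i) (some j)))).map
            (fun j => PySem.Str.slice text (some i) (some j))) _
      (by
        intro acc i _
        exact PySem.List.foldl_append_if
          (fun j => dic.contains (PySem.Str.slice text (some i) (some j)))
          (fun j => PySem.Str.slice text (some i) (some j)) _ _)]
    rw [PySem.List.foldl_append_eq_flatMap]
    simp
  rw [hA]
  unfold fully_segment_alt
  simp only [PySem.Str.len_eq]
  refine (List.flatMap_congr ?_).symm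
  intro i hi
  obtain ⟨h0, hlt⟩ := PySem.List.mem_pyRange_one.mp hi
  obtain ⟨a, rfl⟩ := Int.eq_ofNat_of_zero_le h0
  simp only [Int.toNat_natCast]
  have halt : a < text.toList.length := by exact_mod_cast hlt
  have halt2 : a < text.length := by rw [← String.length_toList]; exact halt
  have h0b : (((PySem.List.pyRange 0 ((text.toList.length : Int)) 1).map
      (fun _ => ([] : List Int))))[a]? = some [] := by
    rw [PySem.List.pyRange_zero_natCast]
    simp [halt2]
  have hbk : List.getD (((PySem.Set.ofList dic).foldl (fun bs w =>
        if ((w.toList.length : Int)) ≠ 0 then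
          (PySem.List.pyRange 0 ((text.toList.length : Int) - (w.toList.length : Int) + 1) 1).foldl (fun bs pos =>
            if PySem.Chars.startswith (text.toList.drop pos.toNat) w.toList then
              bs.set pos.toNat ((bs.getD pos.toNat []) ++ [(w.toList.length : Int)])
            else bs) bs
        else bs)
        ((PySem.List.pyRange 0 ((text.toList.length : Int)) 1).map (fun _ => ([] : List Int)))))
        a []
      = ((PySem.Set.ofList dic).filter (pvHit text.toList a)).map (fun w => (w.toList.length : Int)) := by
    rw [List.getD_eq_getElem?_getD, outer_getElem?, h0b]
    simp
  rw [hbk, bucket_sorted, inner_eq]
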